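-- pv_equiv track=rewrite | github.com/sndb/leetcode | python/last_day_where_you_can_still_cross.py | latestDayToCross
-- ===== SOURCE A (Python) =====
-- def latestDayToCross(row: int, col: int, cells: list[list[int]]) -> int:
--     lo, hi = 0, len(cells) - 1
--     while lo <= hi:
--         mi = (lo + hi) // 2
--         water = set(map(tuple, cells[: mi + 1]))
--         queue = [(1, c) for c in range(1, col + 1) if (1, c) not in water]
--         seen = set(queue)
--         while queue:
--             r, c = queue.pop()
--             if r == row:
--                 lo = mi + 1
--                 break
--
--             for nr, nc in [(r + 1, c), (r - 1, c), (r, c + 1), (r, c - 1)]: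
--                 if 1 <= nr <= row and 1 <= nc <= col and (nr, nc) not in water and (nr, nc) not in seen:
--                     queue.append((nr, nc))
--                     seen.add((nr, nc))
--         else:
--             hi = mi - 1
--
--     return lo
-- ===== SOURCE B (Python) =====
-- def latestDayToCross(row: int, col: int, cells: list[list[int]]) -> int:
--     def can_cross(water):
--         frontier = [(1, c) for c in range(1, col + 1) if (1, c) not in water]
--         reach = set(frontier)
--         while frontier:
--             if any(r == row for r, _ in frontier):
--                 return True
--             nxt = []
--             for r, c in frontier:
--                 for nr, nc in ((r + 1, c), (r - 1, c), (r, c + 1), (r, c - 1)):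
--                     if 1 <= nr <= row and 1 <= nc <= col and (nr, nc) not in water and (nr, nc) not in reach:
--                         reach.add((nr, nc))
--                         nxt.append((nr, nc))
--             frontier = nxt
--         return False
--
--     for d in range(len(cells), 0, -1):
--         if can_cross(set(map(tuple, cells[:d]))):
--             return d
--     return 0
-- ===== Notes on version B (the rewrite author's own statement) =====
-- stated objective: alternative
-- what changed: A binary-searches the day and re-runs a stack-based DFS with a seen-set for each probe; B scans the days backwards from the last and decides each day's crossability with a level-by-level frontier BFS (set saturation), returning the first crossable day.
import Mathlib
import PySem

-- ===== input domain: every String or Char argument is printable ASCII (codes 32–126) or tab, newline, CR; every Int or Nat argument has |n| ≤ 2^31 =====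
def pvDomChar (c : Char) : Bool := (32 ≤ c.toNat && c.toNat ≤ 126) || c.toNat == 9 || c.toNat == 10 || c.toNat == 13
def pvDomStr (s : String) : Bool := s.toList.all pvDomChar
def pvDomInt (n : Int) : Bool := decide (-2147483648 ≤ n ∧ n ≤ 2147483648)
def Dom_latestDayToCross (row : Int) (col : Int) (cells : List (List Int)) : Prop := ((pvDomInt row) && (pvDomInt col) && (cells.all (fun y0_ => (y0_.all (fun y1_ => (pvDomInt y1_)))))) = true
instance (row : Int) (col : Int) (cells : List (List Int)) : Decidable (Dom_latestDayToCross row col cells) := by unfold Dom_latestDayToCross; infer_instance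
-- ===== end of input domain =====

-- B replaces A's binary search + stack DFS by a reverse linear scan over days with a frontier BFS: an alternative algorithm of genuinely different structure (no speed claim).


-- Shared vocabulary (used by the termination lemmas the ports cite).
-- Python's sets are hash sets; the large ones (the flooded cells, the DFS's seen set,
-- the BFS's reach set) are ported as Std.HashSet so the ports evaluate at Python-like cost.
-- a cell is land: inside the 1..row × 1..col grid and not flooded
abbrev pvLandW (row col : Int) (water : Std.HashSet (List Int)) (p : Int × Int) : Prop :=
  1 ≤ p.1 ∧ p.1 ≤ row ∧ 1 ≤ p.2 ∧ p.2 ≤ col ∧ [p.1, p.2] ∉ water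

def pvGrid (row col : Int) : Finset (Int × Int) :=
  ((Finset.range row.toNat) ×ˢ (Finset.range col.toNat)).image
    (fun p => ((p.1 : Int) + 1, (p.2 : Int) + 1))

lemma pvGrid_mem {row col : Int} {p : Int × Int} :
    p ∈ pvGrid row col ↔ 1 ≤ p.1 ∧ p.1 ≤ row ∧ 1 ≤ p.2 ∧ p.2 ≤ col := by
  simp only [pvGrid, Finset.mem_image, Finset.mem_product, Finset.mem_range, Prod.exists,
    Prod.ext_iff]
  constructor
  · rintro ⟨a, b, ⟨ha, hb⟩, heq1, heq2⟩
    omega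
  · rintro ⟨h1, h2, h3, h4⟩
    exact ⟨(p.1 - 1).toNat, (p.2 - 1).toNat, ⟨by omega, by omega⟩, by omega, by omega⟩

lemma pvLandW_mem_grid {row col : Int} {water : Std.HashSet (List Int)} {p : Int × Int}
    (h : pvLandW row col water p) : p ∈ pvGrid row col := by
  rcases h with ⟨h1, h2, h3, h4, -⟩
  exact pvGrid_mem.mpr ⟨h1, h2, h3, h4⟩

-- thin bridges to the Std.HashSet membership/distinctness lemmas (cited, not re-proved)
lemma pvHSmemInsert {α : Type} [BEq α] [LawfulBEq α] [Hashable α]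
    {s : Std.HashSet α} {x y : α} : y ∈ s.insert x ↔ y = x ∨ y ∈ s := by
  rw [Std.HashSet.mem_insert, beq_iff_eq, eq_comm]

lemma pvHSmemToFinset {α : Type} [BEq α] [LawfulBEq α] [Hashable α] [DecidableEq α]
    {s : Std.HashSet α} {x : α} : x ∈ s.toList.toFinset ↔ x ∈ s := by
  rw [List.mem_toFinset, Std.HashSet.mem_toList]

-- the initial frontier: the unflooded top-row cells (both Pythons build this comprehension)
def pvSeeds (col : Int) (water : Std.HashSet (List Int)) : List (Int × Int) :=
  (PySem.List.pyRange 1 (col + 1) 1).filterMap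
    (fun c => if [1, c] ∉ water then some ((1 : Int), c) else none)

-- ===== PORT A =====
-- one neighbour inspection of A's inner for-loop; A's queue is held REVERSED
-- (head = Python's end of list), so Python's queue.pop()/append() are head operations
def pvStepA (row col : Int) (water : Std.HashSet (List Int))
    (st : List (Int × Int) × Std.HashSet (Int × Int)) (p : Int × Int) :
    List (Int × Int) × Std.HashSet (Int × Int) :=
  if pvLandW row col water p ∧ p ∉ st.2 then (p :: st.1, st.2.insert p) else st

-- the neighbour fold pushes one block L of fresh land cells onto queue and seen
lemma pvFoldA_char (row col : Int) (water : Std.HashSet (List Int)) :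
    ∀ (l : List (Int × Int)) (q : List (Int × Int)) (s : Std.HashSet (Int × Int)),
    ∃ L, (List.foldl (pvStepA row col water) (q, s) l).1 = L ++ q ∧ L.Nodup ∧
      (∀ x ∈ L, x ∈ l ∧ pvLandW row col water x ∧ x ∉ s) ∧
      (∀ x, x ∈ (List.foldl (pvStepA row col water) (q, s) l).2 ↔ x ∈ s ∨ x ∈ L) ∧
      (∀ x ∈ l, pvLandW row col water x → x ∈ (List.foldl (pvStepA row col water) (q, s) l).2) := by
  intro l
  induction l with
  | nil =>
    intro q s
    exact ⟨[], by simp, by simp, by simp, by simp, by simp⟩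
  | cons x xs ih =>
    intro q s
    simp only [List.foldl_cons]
    by_cases hc : pvLandW row col water x ∧ x ∉ s
    · have hstep : pvStepA row col water (q, s) x = (x :: q, s.insert x) := by
        simp [pvStepA, hc]
      rw [hstep]
      rcases ih (x :: q) (s.insert x) with ⟨L, hL, hnd, hsound, hmem, hcl⟩
      refine ⟨L ++ [x], ?_, ?_, ?_, ?_, ?_⟩
      · rw [hL]; simp
      · refine List.Nodup.append hnd (List.nodup_singleton x) ?_
        intro a ha hb
        rw [List.mem_singleton] at hb
        subst hb
        exact (hsound a ha).2.2 (pvHSmemInsert.mpr (Or.inl rfl))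
      · intro y hy
        rcases List.mem_append.mp hy with hy | hy
        · rcases hsound y hy with ⟨h1, h2, h3⟩
          exact ⟨by simp [h1], h2, fun hm => h3 (pvHSmemInsert.mpr (Or.inr hm))⟩
        · rw [List.mem_singleton] at hy
          subst hy; exact ⟨by simp, hc.1, hc.2⟩
      · intro y
        rw [hmem y, pvHSmemInsert, List.mem_append, List.mem_singleton]
        tauto
      · intro y hy hl
        rcases List.mem_cons.mp hy with hy | hy
        · subst hy
          exact (hmem y).mpr (Or.inl (pvHSmemInsert.mpr (Or.inl rfl)))
        · exact hcl y hy hl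
    · have hstep : pvStepA row col water (q, s) x = (q, s) := by simp [pvStepA, hc]
      rw [hstep]
      rcases ih q s with ⟨L, hL, hnd, hsound, hmem, hcl⟩
      refine ⟨L, hL, hnd, ?_, hmem, ?_⟩
      · intro y hy
        rcases hsound y hy with ⟨h1, h2, h3⟩
        exact ⟨by simp [h1], h2, h3⟩
      · intro y hy hl
        rcases List.mem_cons.mp hy with hy | hy
        · subst hy
          by_cases hm : y ∈ s
          · exact (hmem y).mpr (Or.inl hm)
          · exact absurd ⟨hl, hm⟩ hc
        · exact hcl y hy hl

-- measure bookkeeping for the search recursions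
lemma pvMeasureA (row col : Int) {S : Finset (Int × Int)} {L : List (Int × Int)}
    (hnd : L.Nodup) (hland : ∀ x ∈ L, x ∈ pvGrid row col ∧ x ∉ S) :
    2 * ((pvGrid row col) \ (S ∪ L.toFinset)).card + L.length ≤ 2 * ((pvGrid row col) \ S).card := by
  have hsub : L.toFinset ⊆ (pvGrid row col) \ S := by
    intro x hx
    rw [List.mem_toFinset] at hx
    rcases hland x hx with ⟨h1, h2⟩
    exact Finset.mem_sdiff.mpr ⟨h1, h2⟩
  have hset : (pvGrid row col) \ (S ∪ L.toFinset) = ((pvGrid row col) \ S) \ L.toFinset := by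
    ext x; simp only [Finset.mem_sdiff, Finset.mem_union, not_or]
    tauto
  have hcard : (((pvGrid row col) \ S) \ L.toFinset).card =
      ((pvGrid row col) \ S).card - L.toFinset.card := by
    rw [Finset.card_sdiff]
    rw [Finset.inter_eq_left.mpr hsub]
  have hlen : L.toFinset.card = L.length := by
    rw [List.toFinset_card_of_nodup hnd]
  have hle : L.toFinset.card ≤ ((pvGrid row col) \ S).card := Finset.card_le_card hsub
  rw [hset, hcard]
  omega

-- A's inner loop: pop (the head of the reversed queue), break on the target row,
-- push fresh land neighbours
def pvDfsA (row col : Int) (water : Std.HashSet (List Int))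
    (queue : List (Int × Int)) (seen : Std.HashSet (Int × Int)) : Bool :=
  match queue with
  | [] => false
  | (r, c) :: rest =>
    if r = row then true
    else
      let st := List.foldl (pvStepA row col water) (rest, seen)
        [(r + 1, c), (r - 1, c), (r, c + 1), (r, c - 1)]
      pvDfsA row col water st.1 st.2
termination_by 2 * ((pvGrid row col) \ seen.toList.toFinset).card + queue.length
decreasing_by
  rcases pvFoldA_char row col water [(r + 1, c), (r - 1, c), (r, c + 1), (r, c - 1)] rest seen with
    ⟨L, hL, hnd, hsound, hmem, -⟩
  have hfin : (List.foldl (pvStepA row col water) (rest, seen)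
      [(r + 1, c), (r - 1, c), (r, c + 1), (r, c - 1)]).2.toList.toFinset =
      seen.toList.toFinset ∪ L.toFinset := by
    ext x
    rw [pvHSmemToFinset, hmem x, Finset.mem_union, pvHSmemToFinset, List.mem_toFinset]
  have hmea := pvMeasureA row col (S := seen.toList.toFinset) hnd
    (fun x hx => ⟨pvLandW_mem_grid (hsound x hx).2.1,
      fun hm => (hsound x hx).2.2 (pvHSmemToFinset.mp hm)⟩)
  rw [hL, hfin]
  simp only [List.length_append, List.length_cons]
  omega

-- A: binary search over days, checking crossability with a fresh DFS each probe
def pvBsA (row col : Int) (cells : List (List Int)) (lo hi : Int) : Int :=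
  if h : lo ≤ hi then
    let mi := PySem.Int.floordiv (lo + hi) 2
    let water := Std.HashSet.ofList (PySem.List.slice cells none (some (mi + 1)))
    let queue := pvSeeds col water
    let seen := Std.HashSet.ofList queue
    if pvDfsA row col water queue.reverse seen then pvBsA row col cells (mi + 1) hi
    else pvBsA row col cells lo (mi - 1)
  else lo
termination_by (hi + 1 - lo).toNat
decreasing_by
  · have hml := (PySem.Int.floordiv_two_mid_bounds h).1
    have hmh := (PySem.Int.floordiv_two_mid_bounds h).2
    omega
  · have hml := (PySem.Int.floordiv_two_mid_bounds h).1
    have hmh := (PySem.Int.floordiv_two_mid_bounds h).2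
    omega

def latestDayToCross (row : Int) (col : Int) (cells : List (List Int)) : Int :=
  pvBsA row col cells 0 ((cells.length : Int) - 1)

-- ===== PORT B =====
-- one neighbour inspection of B's expansion: record a fresh land cell in reach and
-- append it to the next frontier
def pvStepB (row col : Int) (water : Std.HashSet (List Int))
    (st : Std.HashSet (Int × Int) × List (Int × Int)) (p : Int × Int) :
    Std.HashSet (Int × Int) × List (Int × Int) :=
  if pvLandW row col water p ∧ p ∉ st.1 then (st.1.insert p, p :: st.2) else st

def pvAdj (p q : Int × Int) : Prop :=
  q = (p.1 + 1, p.2) ∨ q = (p.1 - 1, p.2) ∨ q = (p.1, p.2 + 1) ∨ q = (p.1, p.2 - 1)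

lemma pvAdj_iff (r c : Int) (q : Int × Int) :
    pvAdj (r, c) q ↔ q ∈ [(r + 1, c), (r - 1, c), (r, c + 1), (r, c - 1)] := by
  simp [pvAdj]

-- B's expansion over one frontier adds one block L of fresh land cells
lemma pvFoldB_inner_char (row col : Int) (water : Std.HashSet (List Int)) :
    ∀ (l : List (Int × Int)) (R : Std.HashSet (Int × Int)) (nl : List (Int × Int)),
    ∃ L, List.foldl (pvStepB row col water) (R, nl) l = ((List.foldl (pvStepB row col water) (R, nl) l).1, L ++ nl) ∧
      L.Nodup ∧
      (∀ x ∈ L, x ∈ l ∧ pvLandW row col water x ∧ x ∉ R) ∧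
      (∀ x, x ∈ (List.foldl (pvStepB row col water) (R, nl) l).1 ↔ x ∈ R ∨ x ∈ L) ∧
      (∀ x ∈ l, pvLandW row col water x → x ∈ (List.foldl (pvStepB row col water) (R, nl) l).1) := by
  intro l
  induction l with
  | nil =>
    intro R nl
    exact ⟨[], by simp, by simp, by simp, by simp, by simp⟩
  | cons x xs ih =>
    intro R nl
    simp only [List.foldl_cons]
    by_cases hc : pvLandW row col water x ∧ x ∉ R
    · have hstep : pvStepB row col water (R, nl) x = (R.insert x, x :: nl) := by
        simp [pvStepB, hc]
      rw [hstep]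
      rcases ih (R.insert x) (x :: nl) with ⟨L, hL, hnd, hsound, hmem, hcl⟩
      refine ⟨L ++ [x], ?_, ?_, ?_, ?_, ?_⟩
      · rw [hL]; simp
      · refine List.Nodup.append hnd (List.nodup_singleton x) ?_
        intro a ha hb
        rw [List.mem_singleton] at hb
        subst hb
        exact (hsound a ha).2.2 (pvHSmemInsert.mpr (Or.inl rfl))
      · intro y hy
        rcases List.mem_append.mp hy with hy | hy
        · rcases hsound y hy with ⟨h1, h2, h3⟩
          exact ⟨by simp [h1], h2, fun hm => h3 (pvHSmemInsert.mpr (Or.inr hm))⟩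
        · rw [List.mem_singleton] at hy
          subst hy; exact ⟨by simp, hc.1, hc.2⟩
      · intro y
        rw [hmem y, pvHSmemInsert, List.mem_append, List.mem_singleton]
        tauto
      · intro y hy hl
        rcases List.mem_cons.mp hy with hy | hy
        · subst hy
          exact (hmem y).mpr (Or.inl (pvHSmemInsert.mpr (Or.inl rfl)))
        · exact hcl y hy hl
    · have hstep : pvStepB row col water (R, nl) x = (R, nl) := by simp [pvStepB, hc]
      rw [hstep]
      rcases ih R nl with ⟨L, hL, hnd, hsound, hmem, hcl⟩
      refine ⟨L, hL, hnd, ?_, hmem, ?_⟩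
      · intro y hy
        rcases hsound y hy with ⟨h1, h2, h3⟩
        exact ⟨by simp [h1], h2, h3⟩
      · intro y hy hl
        rcases List.mem_cons.mp hy with hy | hy
        · subst hy
          by_cases hm : y ∈ R
          · exact (hmem y).mpr (Or.inl hm)
          · exact absurd ⟨hl, hm⟩ hc
        · exact hcl y hy hl

-- B's whole double loop over one frontier
def pvExpandB (row col : Int) (water : Std.HashSet (List Int))
    (reach : Std.HashSet (Int × Int)) (frontier : List (Int × Int)) :
    Std.HashSet (Int × Int) × List (Int × Int) :=
  List.foldl (fun st p => List.foldl (pvStepB row col water) st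
    [(p.1 + 1, p.2), (p.1 - 1, p.2), (p.1, p.2 + 1), (p.1, p.2 - 1)]) (reach, ([] : List (Int × Int))) frontier

-- B's whole double loop over the frontier, characterised the same way
lemma pvFoldB_char (row col : Int) (water : Std.HashSet (List Int)) :
    ∀ (frontier : List (Int × Int)) (R : Std.HashSet (Int × Int)) (nl : List (Int × Int)),
    ∃ L, List.foldl (fun st p => List.foldl (pvStepB row col water) st
        [(p.1 + 1, p.2), (p.1 - 1, p.2), (p.1, p.2 + 1), (p.1, p.2 - 1)]) (R, nl) frontier =
      ((List.foldl (fun st p => List.foldl (pvStepB row col water) st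
        [(p.1 + 1, p.2), (p.1 - 1, p.2), (p.1, p.2 + 1), (p.1, p.2 - 1)]) (R, nl) frontier).1, L ++ nl) ∧
      L.Nodup ∧
      (∀ x ∈ L, (∃ p ∈ frontier, pvAdj p x) ∧ pvLandW row col water x ∧ x ∉ R) ∧
      (∀ x, x ∈ (List.foldl (fun st p => List.foldl (pvStepB row col water) st
        [(p.1 + 1, p.2), (p.1 - 1, p.2), (p.1, p.2 + 1), (p.1, p.2 - 1)]) (R, nl) frontier).1 ↔ x ∈ R ∨ x ∈ L) ∧
      (∀ p ∈ frontier, ∀ x, pvAdj p x → pvLandW row col water x →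
        x ∈ (List.foldl (fun st p => List.foldl (pvStepB row col water) st
          [(p.1 + 1, p.2), (p.1 - 1, p.2), (p.1, p.2 + 1), (p.1, p.2 - 1)]) (R, nl) frontier).1) := by
  intro frontier
  induction frontier with
  | nil =>
    intro R nl
    exact ⟨[], by simp, by simp, by simp, by simp, by simp⟩
  | cons a l ih =>
    intro R nl
    rw [List.foldl_cons]
    rcases pvFoldB_inner_char row col water
      [(a.1 + 1, a.2), (a.1 - 1, a.2), (a.1, a.2 + 1), (a.1, a.2 - 1)] R nl with
      ⟨L1, hL1, hnd1, hsound1, hmem1, hcl1⟩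
    rw [hL1]
    rcases ih (List.foldl (pvStepB row col water) (R, nl)
      [(a.1 + 1, a.2), (a.1 - 1, a.2), (a.1, a.2 + 1), (a.1, a.2 - 1)]).1 (L1 ++ nl) with
      ⟨L2, hL2, hnd2, hsound2, hmem2, hcl2⟩
    refine ⟨L2 ++ L1, by rw [hL2]; simp, ?_, ?_, ?_, ?_⟩
    · refine List.Nodup.append hnd2 hnd1 ?_
      intro x hx2 hx1
      exact (hsound2 x hx2).2.2 ((hmem1 x).mpr (Or.inr hx1))
    · intro y hy
      rcases List.mem_append.mp hy with hy | hy
      · rcases hsound2 y hy with ⟨h1, h2, h3⟩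
        have hyR : y ∉ R := fun hm => h3 ((hmem1 y).mpr (Or.inl hm))
        rcases h1 with ⟨p, hp, hadj⟩
        exact ⟨⟨p, List.mem_cons_of_mem _ hp, hadj⟩, h2, hyR⟩
      · rcases hsound1 y hy with ⟨h1, h2, h3⟩
        exact ⟨⟨a, List.mem_cons_self, (pvAdj_iff a.1 a.2 y).mpr h1⟩, h2, h3⟩
    · intro y
      rw [hmem2 y, hmem1 y, List.mem_append]
      tauto
    · intro p hp x hadj hland
      rcases List.mem_cons.mp hp with hp | hp
      · subst hp
        have hx1 : x ∈ (List.foldl (pvStepB row col water) (R, nl)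
            [(p.1 + 1, p.2), (p.1 - 1, p.2), (p.1, p.2 + 1), (p.1, p.2 - 1)]).1 :=
          hcl1 x ((pvAdj_iff p.1 p.2 x).mp hadj) hland
        exact (hmem2 x).mpr (Or.inl hx1)
      · exact hcl2 p hp x hadj hland

lemma pvExpandB_char (row col : Int) (water : Std.HashSet (List Int))
    (reach : Std.HashSet (Int × Int)) (frontier : List (Int × Int)) :
    ∃ L, pvExpandB row col water reach frontier = ((pvExpandB row col water reach frontier).1, L) ∧
      L.Nodup ∧
      (∀ x ∈ L, (∃ p ∈ frontier, pvAdj p x) ∧ pvLandW row col water x ∧ x ∉ reach) ∧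
      (∀ x, x ∈ (pvExpandB row col water reach frontier).1 ↔ x ∈ reach ∨ x ∈ L) ∧
      (∀ p ∈ frontier, ∀ x, pvAdj p x → pvLandW row col water x →
        x ∈ (pvExpandB row col water reach frontier).1) := by
  rcases pvFoldB_char row col water frontier reach [] with ⟨L, hL, hnd, hsound, hmem, hcl⟩
  exact ⟨L, by rw [pvExpandB, hL]; simp, hnd, hsound, hmem, hcl⟩

-- B's saturation loop: frontier BFS level by level (while frontier: — match on emptiness)
def pvBfsB (row col : Int) (water : Std.HashSet (List Int))
    (reach : Std.HashSet (Int × Int)) (frontier : List (Int × Int)) : Bool :=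
  match frontier with
  | [] => false
  | a :: l =>
    if (a :: l).any (fun p => p.1 = row) then true
    else
      let st := pvExpandB row col water reach (a :: l)
      pvBfsB row col water st.1 st.2
termination_by 2 * ((pvGrid row col) \ reach.toList.toFinset).card + min frontier.length 1
decreasing_by
  rcases pvExpandB_char row col water reach (a :: l) with ⟨L, hL, hnd, hsound, hmem, -⟩
  have hfin : (pvExpandB row col water reach (a :: l)).1.toList.toFinset =
      reach.toList.toFinset ∪ L.toFinset := by
    ext x
    rw [pvHSmemToFinset, hmem x, Finset.mem_union, pvHSmemToFinset, List.mem_toFinset]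
  have hsnd : (pvExpandB row col water reach (a :: l)).2 = L := by
    have := congrArg Prod.snd hL
    simpa using this
  have hmea := pvMeasureA row col (S := reach.toList.toFinset) hnd
    (fun x hx => ⟨pvLandW_mem_grid (hsound x hx).2.1,
      fun hm => (hsound x hx).2.2 (pvHSmemToFinset.mp hm)⟩)
  rw [hfin, hsnd]
  by_cases hLn : L = []
  · subst hLn
    simp only [List.length_nil] at hmea
    simp only [List.toFinset_nil, Finset.union_empty] at hmea ⊢
    simp only [List.length_nil, List.length_cons]
    omega
  · have hpos : 0 < L.length := List.length_pos_iff.mpr hLn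
    simp only [List.length_cons]
    omega

def pvCanCrossB (row col : Int) (water : Std.HashSet (List Int)) : Bool :=
  let frontier := pvSeeds col water
  pvBfsB row col water (Std.HashSet.ofList frontier) frontier

-- B's outer loop: scan the days backwards, return the first crossable one
def pvScanB (row col : Int) (cells : List (List Int)) : Nat → Int
  | 0 => 0
  | d + 1 =>
    if pvCanCrossB row col (Std.HashSet.ofList (cells.take (d + 1))) then ((d : Int) + 1)
    else pvScanB row col cells d

def latestDayToCross_alt (row : Int) (col : Int) (cells : List (List Int)) : Int :=
  pvScanB row col cells cells.length

-- ===== PRECONDITION & SPEC =====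
def Spec_latestDayToCross (row : Int) (col : Int) (cells : List (List Int)) (out : Int) : Prop := out = latestDayToCross_alt row col cells
instance (row : Int) (col : Int) (cells : List (List Int)) (out : Int) : Decidable (Spec_latestDayToCross row col cells out) := by unfold Spec_latestDayToCross; infer_instance

-- ===== CLAIM (what is proved, stated in full; the proofs are below) =====
def Claim_equal_latestDayToCross : Prop := ∀ (row : Int) (col : Int) (cells : List (List Int)), Dom_latestDayToCross row col cells → Spec_latestDayToCross row col cells (latestDayToCross row col cells)

-- ===== LEMMAS AND PROOFS =====

lemma pvHSmemOfList {α : Type} [BEq α] [LawfulBEq α] [Hashable α]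
    {l : List α} {x : α} : x ∈ Std.HashSet.ofList l ↔ x ∈ l := by
  rw [Std.HashSet.mem_ofList]; simp

-- the mathematical reading, over the flooded-cell LIST ws

-- a cell is land: inside the grid and not flooded
def pvLand (row col : Int) (ws : List (List Int)) (p : Int × Int) : Prop :=
  1 ≤ p.1 ∧ p.1 ≤ row ∧ 1 ≤ p.2 ∧ p.2 ≤ col ∧ [p.1, p.2] ∉ ws

-- a seed: an unflooded top-row cell the initial comprehension generates
def pvSeed (col : Int) (ws : List (List Int)) (s : Int × Int) : Prop :=
  s.1 = 1 ∧ 1 ≤ s.2 ∧ s.2 ≤ col ∧ [1, s.2] ∉ ws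

def pvStepRel (row col : Int) (ws : List (List Int)) (p q : Int × Int) : Prop :=
  pvAdj p q ∧ pvLand row col ws q

-- reachable from some seed through land
def pvRch (row col : Int) (ws : List (List Int)) (p : Int × Int) : Prop :=
  ∃ s, pvSeed col ws s ∧ Relation.ReflTransGen (pvStepRel row col ws) s p

def pvCross (row col : Int) (ws : List (List Int)) : Prop :=
  ∃ p, pvRch row col ws p ∧ p.1 = row

lemma pvLandW_iff {row col : Int} {W : Std.HashSet (List Int)} {ws : List (List Int)}
    (hW : ∀ l : List Int, l ∈ W ↔ l ∈ ws) (p : Int × Int) :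
    pvLandW row col W p ↔ pvLand row col ws p := by
  unfold pvLandW pvLand
  rw [hW]

-- completeness template: a seed-containing, step-closed, row-free set refutes crossing
lemma pvClosed_no_cross (row col : Int) (ws : List (List Int)) (S : Int × Int → Prop)
    (hseed : ∀ s, pvSeed col ws s → S s)
    (hclosed : ∀ p, S p → ∀ q, pvStepRel row col ws p q → S q)
    (hno : ∀ p, S p → p.1 ≠ row) : ¬ pvCross row col ws := by
  rintro ⟨p, ⟨s, hs, hrtg⟩, hrow⟩
  refine hno p ?_ hrow
  clear hrow
  induction hrtg with
  | refl => exact hseed s hs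
  | tail _ hstep ih => exact hclosed _ ih _ hstep

lemma pvSeeds_nodup (col : Int) (water : Std.HashSet (List Int)) : (pvSeeds col water).Nodup := by
  refine List.Nodup.filterMap ?_ (PySem.List.nodup_pyRange_one 1 (col + 1))
  intro a a' b hb hb'
  simp only [Option.mem_def] at hb hb'
  split_ifs at hb hb'
  · simp only [Option.some.injEq] at hb hb'
    rw [← hb'] at hb
    exact (Prod.ext_iff.mp hb).2

lemma pvSeeds_mem {col : Int} {W : Std.HashSet (List Int)} {ws : List (List Int)}
    (hW : ∀ l : List Int, l ∈ W ↔ l ∈ ws) (x : Int × Int) :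
    x ∈ pvSeeds col W ↔ pvSeed col ws x := by
  unfold pvSeeds pvSeed
  rw [List.mem_filterMap]
  constructor
  · rintro ⟨c, hc, hx⟩
    rw [PySem.List.mem_pyRange_one] at hc
    split_ifs at hx with hw
    · injection hx with hx
      subst hx
      exact ⟨rfl, hc.1, by omega, fun hm => hw ((hW _).mpr hm)⟩
  · rintro ⟨h1, h2, h3, h4⟩
    refine ⟨x.2, ?_, ?_⟩
    · rw [PySem.List.mem_pyRange_one]; omega
    · rw [if_pos (fun hm => h4 ((hW _).mp hm))]
      simp only [Option.some.injEq]
      exact Prod.ext h1.symm rfl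

-- ---- A's DFS computes crossability ----
lemma pvDfsA_correct (row col : Int) (W : Std.HashSet (List Int)) (ws : List (List Int))
    (hW : ∀ l : List Int, l ∈ W ↔ l ∈ ws) :
    ∀ (queue : List (Int × Int)) (seen : Std.HashSet (Int × Int)),
    (∀ p ∈ queue, p ∈ seen) →
    (∀ p ∈ seen, pvRch row col ws p) →
    (∀ s, pvSeed col ws s → s ∈ seen) →
    (∀ p ∈ seen, p ∉ queue → p.1 ≠ row ∧ ∀ q, pvStepRel row col ws p q → q ∈ seen) →
    queue.Nodup →
    (pvDfsA row col W queue seen = true ↔ pvCross row col ws) := by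
  intro queue seen
  fun_induction pvDfsA row col W queue seen with
  | case1 seen =>
    intro h1 h2 h3 h4 h5
    simp only [Bool.false_eq_true, false_iff]
    exact pvClosed_no_cross row col ws (· ∈ seen) h3
      (fun p hp q hs => (h4 p hp (by simp)).2 q hs)
      (fun p hp => (h4 p hp (by simp)).1)
  | case2 seen c rest =>
    intro h1 h2 h3 h4 h5
    simp only [true_iff]
    exact ⟨(row, c), h2 _ (h1 _ List.mem_cons_self), rfl⟩
  | case3 seen r c rest hr st ih =>
    intro h1 h2 h3 h4 h5
    rcases pvFoldA_char row col W [(r + 1, c), (r - 1, c), (r, c + 1), (r, c - 1)] rest seen with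
      ⟨L, hL, hnd, hsound, hmem, hcl⟩
    have hrc_seen : (r, c) ∈ seen := h1 _ List.mem_cons_self
    have hrch_rc : pvRch row col ws (r, c) := h2 _ hrc_seen
    have hLprop : ∀ x ∈ L, pvStepRel row col ws (r, c) x ∧ x ∉ seen := by
      intro x hx
      rcases hsound x hx with ⟨hxl, hxland, hxs⟩
      exact ⟨⟨(pvAdj_iff r c x).mpr hxl, (pvLandW_iff hW x).mp hxland⟩, hxs⟩
    rw [ih]
    · intro p hp
      rw [hL, List.mem_append] at hp
      rcases hp with hp | hp
      · exact (hmem p).mpr (Or.inr hp)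
      · exact (hmem p).mpr (Or.inl (h1 _ (List.mem_cons_of_mem _ hp)))
    · intro p hp
      rcases (hmem p).mp hp with hp | hp
      · exact h2 _ hp
      · exact hrch_rc.imp (fun s hs => ⟨hs.1, hs.2.tail (hLprop p hp).1⟩)
    · intro s hs
      exact (hmem s).mpr (Or.inl (h3 s hs))
    · intro p hp hpq
      rw [hL, List.mem_append, not_or] at hpq
      rcases (hmem p).mp hp with hp | hp
      · by_cases hpx : p = (r, c)
        · subst hpx
          refine ⟨by simpa using hr, ?_⟩
          intro q hsq
          have hqnb : q ∈ [(r + 1, c), (r - 1, c), (r, c + 1), (r, c - 1)] :=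
            (pvAdj_iff r c q).mp hsq.1
          exact hcl q hqnb ((pvLandW_iff hW q).mpr hsq.2)
        · have hpnot : p ∉ (r, c) :: rest := by
            simp only [List.mem_cons, not_or]
            exact ⟨hpx, hpq.2⟩
          rcases h4 p hp hpnot with ⟨hrow, hclo⟩
          exact ⟨hrow, fun q hsq => (hmem q).mpr (Or.inl (hclo q hsq))⟩
      · exact absurd hp hpq.1
    · rw [hL]
      have hrestnd : rest.Nodup := (List.nodup_cons.mp h5).2
      refine List.Nodup.append hnd hrestnd ?_
      intro a ha hb
      exact (hLprop a ha).2 (h1 _ (List.mem_cons_of_mem _ hb))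

-- ---- B's BFS computes crossability ----
lemma pvBfsB_correct (row col : Int) (W : Std.HashSet (List Int)) (ws : List (List Int))
    (hW : ∀ l : List Int, l ∈ W ↔ l ∈ ws) :
    ∀ (reach : Std.HashSet (Int × Int)) (frontier : List (Int × Int)),
    (∀ p ∈ frontier, p ∈ reach) →
    (∀ p ∈ reach, pvRch row col ws p) →
    (∀ s, pvSeed col ws s → s ∈ reach) →
    (∀ p ∈ reach, p ∉ frontier → p.1 ≠ row ∧ ∀ q, pvStepRel row col ws p q → q ∈ reach) →
    (pvBfsB row col W reach frontier = true ↔ pvCross row col ws) := by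
  intro reach frontier
  fun_induction pvBfsB row col W reach frontier with
  | case1 reach =>
    intro h1 h2 h3 h4
    simp only [Bool.false_eq_true, false_iff]
    exact pvClosed_no_cross row col ws (· ∈ reach) h3
      (fun p hp q hs => (h4 p hp (by simp)).2 q hs)
      (fun p hp => (h4 p hp (by simp)).1)
  | case2 reach a l hany =>
    intro h1 h2 h3 h4
    simp only [true_iff]
    rw [List.any_eq_true] at hany
    obtain ⟨p, hp, hrow⟩ := hany
    exact ⟨p, h2 _ (h1 _ hp), by simpa using hrow⟩
  | case3 reach a l hany st ih =>
    intro h1 h2 h3 h4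
    have hnorow : ∀ p ∈ a :: l, p.1 ≠ row := by
      intro p hp
      rw [List.any_eq_true] at hany
      intro h; exact hany ⟨p, hp, by simpa using h⟩
    rcases pvExpandB_char row col W reach (a :: l) with ⟨L, hL, hnd, hsound, hmem, hcl⟩
    have hst : st.2 = L := by
      show (pvExpandB row col W reach (a :: l)).2 = L
      simpa using congrArg Prod.snd hL
    apply ih
    · intro p hp
      rw [hst] at hp
      exact (hmem p).mpr (Or.inr hp)
    · intro p hp
      rcases (hmem p).mp hp with hp | hp
      · exact h2 _ hp
      · rcases hsound p hp with ⟨⟨q, hq, hadj⟩, hland, -⟩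
        exact (h2 _ (h1 _ hq)).imp
          (fun s hs => ⟨hs.1, hs.2.tail ⟨hadj, (pvLandW_iff hW p).mp hland⟩⟩)
    · intro s hs
      exact (hmem s).mpr (Or.inl (h3 s hs))
    · intro p hp hpn
      rw [hst] at hpn
      rcases (hmem p).mp hp with hp | hp
      · by_cases hpf : p ∈ a :: l
        · refine ⟨hnorow p hpf, fun q hsq => ?_⟩
          exact hcl p hpf q hsq.1 ((pvLandW_iff hW q).mpr hsq.2)
        · rcases h4 p hp hpf with ⟨hrow, hclo⟩
          exact ⟨hrow, fun q hsq => (hmem q).mpr (Or.inl (hclo q hsq))⟩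
      · exact absurd hp hpn

-- ---- the two checkers agree with pvCross ----
lemma pvCheckA_iff (row col : Int) (ws : List (List Int)) :
    pvDfsA row col (Std.HashSet.ofList ws) (pvSeeds col (Std.HashSet.ofList ws)).reverse
      (Std.HashSet.ofList (pvSeeds col (Std.HashSet.ofList ws))) = true ↔
      pvCross row col ws := by
  have hW : ∀ l : List Int, l ∈ Std.HashSet.ofList ws ↔ l ∈ ws := fun l => pvHSmemOfList
  apply pvDfsA_correct row col _ ws hW
  · intro p hp
    exact pvHSmemOfList.mpr (List.mem_reverse.mp hp)
  · intro p hp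
    exact ⟨p, (pvSeeds_mem hW p).mp (pvHSmemOfList.mp hp), Relation.ReflTransGen.refl⟩
  · intro s hs
    exact pvHSmemOfList.mpr ((pvSeeds_mem hW s).mpr hs)
  · intro p hp hpq
    exact absurd (List.mem_reverse.mpr (pvHSmemOfList.mp hp)) hpq
  · exact List.nodup_reverse.mpr (pvSeeds_nodup col _)

lemma pvCheckB_iff (row col : Int) (ws : List (List Int)) :
    pvCanCrossB row col (Std.HashSet.ofList ws) = true ↔ pvCross row col ws := by
  have hW : ∀ l : List Int, l ∈ Std.HashSet.ofList ws ↔ l ∈ ws := fun l => pvHSmemOfList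
  unfold pvCanCrossB
  apply pvBfsB_correct row col _ ws hW
  · intro p hp
    exact pvHSmemOfList.mpr hp
  · intro p hp
    exact ⟨p, (pvSeeds_mem hW p).mp (pvHSmemOfList.mp hp), Relation.ReflTransGen.refl⟩
  · intro s hs
    exact pvHSmemOfList.mpr ((pvSeeds_mem hW s).mpr hs)
  · intro p hp hpq
    exact absurd (pvHSmemOfList.mp hp) hpq

-- ---- monotonicity in the flooded set ----
lemma pvCross_mono {row col : Int} {w1 w2 : List (List Int)} (h : ∀ l ∈ w1, l ∈ w2) :
    pvCross row col w2 → pvCross row col w1 := by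
  rintro ⟨p, ⟨s, hs, hrtg⟩, hrow⟩
  have hland : ∀ q, pvLand row col w2 q → pvLand row col w1 q := by
    intro q hq
    exact ⟨hq.1, hq.2.1, hq.2.2.1, hq.2.2.2.1, fun hm => hq.2.2.2.2 (h _ hm)⟩
  refine ⟨p, ⟨s, ⟨hs.1, hs.2.1, hs.2.2.1, fun hm => hs.2.2.2 (h _ hm)⟩, ?_⟩, hrow⟩
  exact hrtg.mono (fun a b hab => ⟨hab.1, hland _ hab.2⟩)

lemma pvPB_anti (row col : Int) (cells : List (List Int)) {d d' : Nat} (hdd : d ≤ d')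
    (h : pvCanCrossB row col (Std.HashSet.ofList (cells.take d')) = true) :
    pvCanCrossB row col (Std.HashSet.ofList (cells.take d)) = true := by
  rw [pvCheckB_iff] at h ⊢
  refine pvCross_mono ?_ h
  intro l hl
  have : cells.take d = (cells.take d').take d := by
    rw [List.take_take, Nat.min_eq_left hdd]
  rw [this] at hl
  exact List.take_subset _ _ hl

-- ---- B's scan is Nat.findGreatest ----
lemma pvScanB_eq (row col : Int) (cells : List (List Int)) :
    ∀ k, pvScanB row col cells k =
      ((Nat.findGreatest (fun d => pvCanCrossB row col (Std.HashSet.ofList (cells.take d)) = true) k : Nat) : Int) := by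
  intro k
  induction k with
  | zero => simp [pvScanB]
  | succ d ih =>
    rw [Nat.findGreatest_succ]
    unfold pvScanB
    split_ifs with hc
    · push_cast; ring
    · exact ih

-- ---- A's binary search is the same Nat.findGreatest ----
lemma pvBsA_eq (row col : Int) (cells : List (List Int)) :
    ∀ (lo hi : Int), 0 ≤ lo → lo ≤ hi + 1 → hi ≤ (cells.length : Int) - 1 →
    (lo = 0 ∨ pvCanCrossB row col (Std.HashSet.ofList (cells.take lo.toNat)) = true) →
    (∀ d : Nat, hi + 1 < (d : Int) → d ≤ cells.length →
      ¬ pvCanCrossB row col (Std.HashSet.ofList (cells.take d)) = true) →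
    pvBsA row col cells lo hi =
      ((Nat.findGreatest (fun d => pvCanCrossB row col (Std.HashSet.ofList (cells.take d)) = true) cells.length : Nat) : Int) := by
  intro lo hi
  fun_induction pvBsA row col cells lo hi with
  | case1 lo hi hle mi water queue seen hdfs ih =>
    intro h0 hlo1 hhi hleft hright
    have hmi := PySem.Int.floordiv_two_mid_bounds hle
    have hwater : water = Std.HashSet.ofList (cells.take (mi + 1).toNat) := by
      show Std.HashSet.ofList (PySem.List.slice cells none (some (mi + 1))) = _
      rw [PySem.List.slice_to cells (by omega)]
    have hda : pvDfsA row col water queue.reverse seen = true ↔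
        pvCanCrossB row col (Std.HashSet.ofList (cells.take (mi + 1).toNat)) = true := by
      show pvDfsA row col water (pvSeeds col water).reverse (Std.HashSet.ofList (pvSeeds col water)) = true ↔ _
      rw [hwater, pvCheckA_iff, pvCheckB_iff]
    apply ih
    · omega
    · omega
    · exact hhi
    · exact Or.inr (hda.mp hdfs)
    · exact hright
  | case2 lo hi hle mi water queue seen hdfs ih =>
    intro h0 hlo1 hhi hleft hright
    have hmi := PySem.Int.floordiv_two_mid_bounds hle
    have hwater : water = Std.HashSet.ofList (cells.take (mi + 1).toNat) := by
      show Std.HashSet.ofList (PySem.List.slice cells none (some (mi + 1))) = _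
      rw [PySem.List.slice_to cells (by omega)]
    have hda : pvDfsA row col water queue.reverse seen = true ↔
        pvCanCrossB row col (Std.HashSet.ofList (cells.take (mi + 1).toNat)) = true := by
      show pvDfsA row col water (pvSeeds col water).reverse (Std.HashSet.ofList (pvSeeds col water)) = true ↔ _
      rw [hwater, pvCheckA_iff, pvCheckB_iff]
    apply ih
    · exact h0
    · omega
    · omega
    · exact hleft
    · intro d hd hdn hP
      have hPmi : pvCanCrossB row col (Std.HashSet.ofList (cells.take (mi + 1).toNat)) = true :=
        pvPB_anti row col cells (by omega) hP
      exact hdfs (hda.mpr hPmi)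
  | case3 lo hi hgt =>
    intro h0 hlo1 hhi hleft hright
    have hres : Nat.findGreatest
        (fun d => pvCanCrossB row col (Std.HashSet.ofList (cells.take d)) = true) cells.length = lo.toNat := by
      rw [Nat.findGreatest_eq_iff]
      refine ⟨by omega, ?_, ?_⟩
      · intro hne
        rcases hleft with h | h
        · omega
        · exact h
      · intro k hk hkn
        exact hright k (by omega) hkn
    rw [hres]
    omega

-- ===== VERDICT (by name: the statement is the Claim_ definition above) =====
theorem latestDayToCross_spec : Claim_equal_latestDayToCross := by
  intro row col cells _
  unfold Spec_latestDayToCross latestDayToCross latestDayToCross_alt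
  rw [pvScanB_eq, pvBsA_eq]
  · omega
  · omega
  · omega
  · exact Or.inl rfl
  · intro d hd hdn
    omega
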